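-- pv_equiv track=rewrite | github.com/newsbreakDuadua9/RAGTruth | compute_metrics.py | compute_multi_spans
-- ===== SOURCE A (Python) =====
-- def compute_multi_spans(gold_spans, pred_spans):
--     """
--     Compute the F1 score for multiple spans.
--     :param gold_spans: A list of ground truth spans, each represented as a (start, end) tuple
--     :param pred_spans: A list of predicted spans, each represented as a (start, end) tuple
--     :return: The F1 score
--     """
--     gold_sets = [set(range(int(start), int(end))) for start, end in gold_spans]
--     pred_sets = [set(range(int(start), int(end))) for start, end in pred_spans]
--
--     gold_union = set.union(*gold_sets)
--     pred_union = set.union(*pred_sets)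
--
--     tp = len(gold_union.intersection(pred_union))
--     pred_len = len(pred_union)
--     gold_len = len(gold_union)
--
--     return tp, pred_len, gold_len
-- ===== SOURCE B (Python) =====
-- def _merged(spans):
--     """Sort the non-empty intervals by start and merge overlapping/touching ones."""
--     ivs = sorted(((int(s), int(e)) for s, e in spans if int(s) < int(e)),
--                  key=lambda iv: iv[0])
--     merged = []
--     for s, e in ivs:
--         if merged and s <= merged[-1][1]:
--             merged[-1] = (merged[-1][0], max(merged[-1][1], e))
--         else:
--             merged.append((s, e))
--     return merged
--
--
-- def compute_multi_spans(gold_spans, pred_spans):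
--     g = _merged(gold_spans)
--     p = _merged(pred_spans)
--     gold_len = sum(e - s for s, e in g)
--     pred_len = sum(e - s for s, e in p)
--     tp = 0
--     for gs, ge in g:
--         for ps, pe in p:
--             tp += max(0, min(ge, pe) - max(gs, ps))
--     return tp, pred_len, gold_len
-- ===== Notes on version B (the rewrite author's own statement) =====
-- stated objective: faster
-- what changed: Instead of materialising every covered integer in Python sets and intersecting them, B sorts and merges each side's intervals and computes union lengths and the true-positive count arithmetically from interval endpoints (sum of lengths of merged intervals, sum of pairwise overlaps of the two disjoint merged lists).
import Mathlib
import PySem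

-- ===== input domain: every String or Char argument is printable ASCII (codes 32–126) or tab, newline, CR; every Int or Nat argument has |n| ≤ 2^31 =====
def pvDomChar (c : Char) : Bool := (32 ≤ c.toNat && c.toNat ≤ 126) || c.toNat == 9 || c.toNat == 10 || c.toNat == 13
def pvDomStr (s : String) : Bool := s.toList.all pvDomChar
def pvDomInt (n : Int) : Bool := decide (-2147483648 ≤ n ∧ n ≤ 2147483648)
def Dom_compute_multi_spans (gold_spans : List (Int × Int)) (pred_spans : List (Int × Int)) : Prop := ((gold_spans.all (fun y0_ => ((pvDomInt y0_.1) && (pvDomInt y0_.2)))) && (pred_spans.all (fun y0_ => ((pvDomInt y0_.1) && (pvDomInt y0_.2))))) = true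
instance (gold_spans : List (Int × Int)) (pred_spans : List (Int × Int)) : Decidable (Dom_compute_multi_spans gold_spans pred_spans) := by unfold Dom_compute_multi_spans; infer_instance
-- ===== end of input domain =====

-- B replaces A's per-integer set materialisation (union/intersection of set(range(s, e)))
-- by sort-merge of the intervals and endpoint arithmetic (objective: faster).


-- ===== PORT A =====
-- set(range(int(start), int(end))) — int() on an int is the identity; a range has pairwise
-- distinct elements, so set(range(a, b)) IS the range list as a PySem.Set
-- (exact by PySem.Set.ofList_eq_self_of_nodup with PySem.List.nodup_pyRange_one)
def pvSpanSet (p : Int × Int) : PySem.Set Int :=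
  PySem.List.pyRange p.1 p.2 1

-- hash-indexed evaluation of PySem.Set.union / inter (proved equal below)
def pvHStep (st : List Int × Std.HashSet Int) (x : Int) : List Int × Std.HashSet Int :=
  if st.2.contains x then st else (x :: st.1, st.2.insert x)

def pvHUnion (s t : List Int) : List Int :=
  s ++ ((t.foldl pvHStep ([], Std.HashSet.ofList s)).1).reverse

def pvHInter (s t : List Int) : List Int :=
  let ht := Std.HashSet.ofList t
  s.filter (fun x => ht.contains x)

def compute_multi_spans (gold_spans : List (Int × Int)) (pred_spans : List (Int × Int)) : Int × Int × Int :=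
  let gold_sets := gold_spans.map pvSpanSet
  let pred_sets := pred_spans.map pvSpanSet
  -- set.union(*sets) = sets[0] | sets[1] | …; raises TypeError on an empty list (excluded by Pre_)
  match gold_sets, pred_sets with
  | g0 :: gs, p0 :: ps =>
    let gold_union := gs.foldl pvHUnion g0
    let pred_union := ps.foldl pvHUnion p0
    let tp := PySem.Set.len (pvHInter gold_union pred_union)
    (tp, PySem.Set.len pred_union, PySem.Set.len gold_union)
  | _, _ => (0, 0, 0)   -- unreachable under Pre_ (the Python raises here)

-- ===== PORT B =====
-- one step of the merge loop; the `merged` accumulator is kept reversed (head = last appended)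
def pvMergeStep (merged : List (Int × Int)) (iv : Int × Int) : List (Int × Int) :=
  match merged with
  | [] => [iv]
  | last :: rest =>
    if iv.1 ≤ last.2 then (last.1, max last.2 iv.2) :: rest
    else iv :: last :: rest

def pvMerged (spans : List (Int × Int)) : List (Int × Int) :=
  let ivs := PySem.List.sorted (spans.filter (fun p => p.1 < p.2)) (fun iv => iv.1) false
  (ivs.foldl pvMergeStep []).reverse

def compute_multi_spans_alt (gold_spans : List (Int × Int)) (pred_spans : List (Int × Int)) : Int × Int × Int :=
  let g := pvMerged gold_spans
  let p := pvMerged pred_spans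
  let gold_len := (g.map (fun q => q.2 - q.1)).sum
  let pred_len := (p.map (fun q => q.2 - q.1)).sum
  let tp := g.foldl (fun acc a => p.foldl (fun acc2 b => acc2 + max 0 (min a.2 b.2 - max a.1 b.1)) acc) 0
  (tp, pred_len, gold_len)

-- ===== PRECONDITION & SPEC =====
-- Pre_ excludes exactly the inputs on which the Python A raises: set.union(*sets) needs at least one set per side.
def Pre_compute_multi_spans (gold_spans : List (Int × Int)) (pred_spans : List (Int × Int)) : Prop :=
  gold_spans ≠ [] ∧ pred_spans ≠ []
instance (gold_spans : List (Int × Int)) (pred_spans : List (Int × Int)) : Decidable (Pre_compute_multi_spans gold_spans pred_spans) := by unfold Pre_compute_multi_spans; infer_instance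

def pvWitness_compute_multi_spans : (List (Int × Int)) × (List (Int × Int)) := ([(1, 5), (3, 8)], [(2, 4), (7, 11)])

def Spec_compute_multi_spans (gold_spans : List (Int × Int)) (pred_spans : List (Int × Int)) (out : Int × Int × Int) : Prop := out = compute_multi_spans_alt gold_spans pred_spans
instance (gold_spans : List (Int × Int)) (pred_spans : List (Int × Int)) (out : Int × Int × Int) : Decidable (Spec_compute_multi_spans gold_spans pred_spans out) := by unfold Spec_compute_multi_spans; infer_instance

-- ===== CLAIM (what is proved, stated in full; the proofs are below) =====
def Claim_equal_compute_multi_spans : Prop := ∀ (gold_spans : List (Int × Int)) (pred_spans : List (Int × Int)), Dom_compute_multi_spans gold_spans pred_spans → Pre_compute_multi_spans gold_spans pred_spans → Spec_compute_multi_spans gold_spans pred_spans (compute_multi_spans gold_spans pred_spans)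
-- ===== LEMMAS AND PROOFS =====
theorem pvHUnion_go (t : List Int) : ∀ (news : List Int) (h : Std.HashSet Int) (s0 : List Int),
    (∀ x, h.contains x = (s0 ++ news.reverse).contains x) →
    t.foldl PySem.Set.add (s0 ++ news.reverse) = s0 ++ ((t.foldl pvHStep (news, h)).1).reverse := by
  induction t with
  | nil => intro news h s0 _; simp
  | cons x xs ih =>
    intro news h s0 hinv
    rw [List.foldl_cons, List.foldl_cons]
    by_cases hx : x ∈ s0 ++ news.reverse
    · have hc : h.contains x = true := by rw [hinv]; simpa using hx
      rw [show PySem.Set.add (s0 ++ news.reverse) x = s0 ++ news.reverse from by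
        simp [PySem.Set.add, PySem.Set.contains, hx]]
      rw [show pvHStep (news, h) x = (news, h) from by simp [pvHStep, hc]]
      exact ih news h s0 hinv
    · have hc : h.contains x = false := by rw [hinv]; simpa using hx
      rw [show PySem.Set.add (s0 ++ news.reverse) x = s0 ++ (x :: news).reverse from by
        simp [PySem.Set.add, PySem.Set.contains, hx, List.reverse_cons]]
      rw [show pvHStep (news, h) x = (x :: news, h.insert x) from by simp [pvHStep, hc]]
      refine ih (x :: news) (h.insert x) s0 (fun y => ?_)
      rw [Std.HashSet.contains_insert, hinv y, Bool.eq_iff_iff]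
      simp [List.reverse_cons, beq_iff_eq]
      tauto

theorem pvHUnion_eq (s t : List Int) : pvHUnion s t = PySem.Set.union s t := by
  have := pvHUnion_go t [] (Std.HashSet.ofList s) s
    (fun x => by rw [Std.HashSet.contains_ofList]; simp)
  simp only [List.reverse_nil, List.append_nil] at this
  rw [pvHUnion, ← this]
  rfl

theorem pvHInter_eq (s t : List Int) : pvHInter s t = PySem.Set.inter s t := by
  unfold pvHInter PySem.Set.inter
  exact List.filter_congr (fun x _ => by rw [Std.HashSet.contains_ofList]; rfl)

theorem pvHUnion_eq_union : (pvHUnion : List Int → List Int → List Int) = PySem.Set.union :=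
  funext fun s => funext fun t => pvHUnion_eq s t

-- x is covered by (at least) one of the intervals of M
def pvCov (M : List (Int × Int)) (x : Int) : Prop := ∃ p ∈ M, p.1 ≤ x ∧ x < p.2
def pvCovF (M : List (Int × Int)) : Finset Int :=
  (M.flatMap (fun p => PySem.List.pyRange p.1 p.2 1)).toFinset

theorem mem_pvCovF (M : List (Int × Int)) (x : Int) : x ∈ pvCovF M ↔ pvCov M x := by
  simp [pvCovF, pvCov, List.mem_flatMap, PySem.List.mem_pyRange_one]

theorem pvCovF_cons (p : Int × Int) (M : List (Int × Int)) :
    pvCovF (p :: M) = (PySem.List.pyRange p.1 p.2 1).toFinset ∪ pvCovF M := by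
  ext x; simp [pvCovF]

theorem pvRange_card (a b : Int) : (((PySem.List.pyRange a b 1).toFinset.card : Int)) = max 0 (b - a) := by
  rw [List.toFinset_card_of_nodup (PySem.List.nodup_pyRange_one a b), PySem.List.length_pyRange_one]
  omega

theorem pvMergeFold (ivs : List (Int × Int)) :
    ∀ acc : List (Int × Int),
    (∀ p ∈ ivs, p.1 < p.2) →
    ivs.Pairwise (fun a b => a.1 ≤ b.1) →
    (∀ p ∈ acc, p.1 < p.2) →
    acc.Pairwise (fun a b => b.2 < a.1) →
    (∀ iv ∈ ivs, ∀ hd ∈ acc.head?, hd.1 ≤ iv.1) →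
    (∀ p ∈ ivs.foldl pvMergeStep acc, p.1 < p.2) ∧
    (ivs.foldl pvMergeStep acc).Pairwise (fun a b => b.2 < a.1) ∧
    (∀ x, pvCov (ivs.foldl pvMergeStep acc) x ↔ pvCov acc x ∨ pvCov ivs x) := by
  induction ivs with
  | nil =>
    intro acc _ _ h3 h4 _
    refine ⟨h3, h4, fun x => ?_⟩
    simp [pvCov]
  | cons iv rest ih =>
    intro acc h1 h2 h3 h4 h5
    have hiv : iv.1 < iv.2 := h1 iv (by simp)
    have h2' : rest.Pairwise (fun a b => a.1 ≤ b.1) := (List.pairwise_cons.mp h2).2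
    have h2h : ∀ q ∈ rest, iv.1 ≤ q.1 := (List.pairwise_cons.mp h2).1
    have h1' : ∀ p ∈ rest, p.1 < p.2 := fun p hp => h1 p (by simp [hp])
    have key : (∀ p ∈ pvMergeStep acc iv, p.1 < p.2) ∧
        (pvMergeStep acc iv).Pairwise (fun a b => b.2 < a.1) ∧
        (∀ q ∈ rest, ∀ hd ∈ (pvMergeStep acc iv).head?, hd.1 ≤ q.1) ∧
        (∀ x, pvCov (pvMergeStep acc iv) x ↔ pvCov acc x ∨ (iv.1 ≤ x ∧ x < iv.2)) := by
      match acc with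
      | [] =>
        refine ⟨by simpa [pvMergeStep] using hiv, by simp [pvMergeStep], ?_, ?_⟩
        · intro q hq hd hhd; simp [pvMergeStep] at hhd; subst hhd; exact h2h q hq
        · intro x; simp [pvMergeStep, pvCov]
      | last :: rest0 =>
        have hlast : last.1 < last.2 := h3 last (by simp)
        have hhd : last.1 ≤ iv.1 := h5 iv (by simp) last (by simp)
        have h4' := List.pairwise_cons.mp h4
        by_cases hc : iv.1 ≤ last.2
        · refine ⟨?_, ?_, ?_, ?_⟩
          · intro p hp
            simp [pvMergeStep, hc] at hp
            rcases hp with rfl | hp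
            · simp; omega
            · exact h3 p (by simp [hp])
          · rw [pvMergeStep]; simp only [hc, if_true]
            exact List.pairwise_cons.mpr ⟨fun b hb => (h4'.1 b hb), h4'.2⟩
          · intro q hq hd hhd'
            simp [pvMergeStep, hc] at hhd'
            rw [← hhd']
            exact le_trans hhd (h2h q hq)
          · intro x
            constructor
            · intro ⟨p, hp, hx1, hx2⟩
              simp [pvMergeStep, hc] at hp
              rcases hp with rfl | hp
              · simp at hx1 hx2
                by_cases hx : x < last.2
                · exact Or.inl ⟨last, by simp, hx1, hx⟩
                · right; constructor <;> omega
              · exact Or.inl ⟨p, by simp [hp], hx1, hx2⟩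
            · rintro (⟨p, hp, hx1, hx2⟩ | ⟨hx1, hx2⟩)
              · simp at hp
                rcases hp with rfl | hp
                · exact ⟨(p.1, max p.2 iv.2), by simp [pvMergeStep, hc], hx1, by simp; omega⟩
                · exact ⟨p, by simp [pvMergeStep, hc, hp], hx1, hx2⟩
              · exact ⟨(last.1, max last.2 iv.2), by simp [pvMergeStep, hc], by omega, by simp; omega⟩
        · have hc' : ¬ iv.1 ≤ last.2 := hc
          refine ⟨?_, ?_, ?_, ?_⟩
          · intro p hp
            simp [pvMergeStep, hc'] at hp
            rcases hp with rfl | rfl | hp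
            · exact hiv
            · exact hlast
            · exact h3 p (by simp [hp])
          · rw [pvMergeStep]; simp only [hc', if_false]
            refine List.pairwise_cons.mpr ⟨?_, h4⟩
            intro b hb
            simp at hb
            push_neg at hc
            rcases hb with rfl | hb
            · omega
            · have := h4'.1 b hb; omega
          · intro q hq hd hhd'
            simp [pvMergeStep, hc'] at hhd'
            rw [← hhd']
            exact h2h q hq
          · intro x
            simp [pvMergeStep, hc', pvCov]
            constructor
            · rintro (h | h | h)
              · exact Or.inr h
              · exact Or.inl (Or.inl h)
              · exact Or.inl (Or.inr h)
            · rintro ((h | h) | h)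
              · exact Or.inr (Or.inl h)
              · exact Or.inr (Or.inr h)
              · exact Or.inl h
    obtain ⟨k1, k2, k3, k4⟩ := key
    have := ih (pvMergeStep acc iv) h1' h2' k1 k2 k3
    rw [List.foldl_cons]
    refine ⟨this.1, this.2.1, fun x => ?_⟩
    rw [this.2.2 x, k4 x]
    simp [pvCov]
    exact or_assoc

theorem pvCov_perm {M N : List (Int × Int)} (h : ∀ q, q ∈ M ↔ q ∈ N) (x : Int) :
    pvCov M x ↔ pvCov N x := by
  unfold pvCov
  constructor
  · rintro ⟨p, hp, h1, h2⟩; exact ⟨p, (h p).mp hp, h1, h2⟩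
  · rintro ⟨p, hp, h1, h2⟩; exact ⟨p, (h p).mpr hp, h1, h2⟩

theorem pvMerged_props (spans : List (Int × Int)) :
    (∀ p ∈ pvMerged spans, p.1 < p.2) ∧
    (pvMerged spans).Pairwise (fun a b => a.2 < b.1) ∧
    (∀ x, pvCov (pvMerged spans) x ↔ pvCov spans x) := by
  unfold pvMerged
  have hmem : ∀ q, q ∈ PySem.List.sorted (spans.filter (fun p => p.1 < p.2)) (fun iv => iv.1) false ↔
      q ∈ spans.filter (fun p => p.1 < p.2) := fun q => PySem.List.mem_sorted _ _ _ q
  have h1 : ∀ p ∈ PySem.List.sorted (spans.filter (fun p => p.1 < p.2)) (fun iv => iv.1) false, p.1 < p.2 := by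
    intro p hp
    have := (hmem p).mp hp
    simp only [List.mem_filter, decide_eq_true_eq] at this
    exact this.2
  have h2 := PySem.List.sorted_pairwise (xs := spans.filter (fun p => p.1 < p.2)) (key := fun iv => iv.1)
  obtain ⟨k1, k2, k3⟩ := pvMergeFold _ [] h1 h2 (by simp) (by simp) (by simp)
  refine ⟨?_, ?_, ?_⟩
  · intro p hp; exact k1 p (by simpa using hp)
  · rw [List.pairwise_reverse]; exact k2
  · intro x
    have hrev : pvCov ((PySem.List.sorted (spans.filter (fun p => p.1 < p.2)) (fun iv => iv.1) false).foldl pvMergeStep []).reverse x ↔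
        pvCov ((PySem.List.sorted (spans.filter (fun p => p.1 < p.2)) (fun iv => iv.1) false).foldl pvMergeStep []) x :=
      pvCov_perm (fun q => by simp) x
    rw [hrev, k3 x]
    have hf : pvCov (spans.filter (fun p => p.1 < p.2)) x ↔ pvCov spans x := by
      constructor
      · rintro ⟨p, hp, hx⟩
        exact ⟨p, (List.mem_filter.mp hp).1, hx⟩
      · rintro ⟨p, hp, hx1, hx2⟩
        exact ⟨p, List.mem_filter.mpr ⟨hp, by simp; omega⟩, hx1, hx2⟩
    rw [pvCov_perm hmem x, hf]
    simp [pvCov]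

theorem pvDisjoint_covF (p : Int × Int) (M : List (Int × Int)) (h : ∀ q ∈ M, p.2 < q.1) :
    Disjoint (PySem.List.pyRange p.1 p.2 1).toFinset (pvCovF M) := by
  rw [Finset.disjoint_left]
  intro x hx hx2
  rw [mem_pvCovF] at hx2
  obtain ⟨q, hq, hq1, hq2⟩ := hx2
  simp only [List.mem_toFinset, PySem.List.mem_pyRange_one] at hx
  have := h q hq
  omega

theorem pvCard_covF (M : List (Int × Int)) (h1 : ∀ p ∈ M, p.1 < p.2)
    (h2 : M.Pairwise (fun a b => a.2 < b.1)) :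
    ((pvCovF M).card : Int) = (M.map (fun q => q.2 - q.1)).sum := by
  induction M with
  | nil => simp [pvCovF]
  | cons p M ih =>
    obtain ⟨hhd, htl⟩ := List.pairwise_cons.mp h2
    rw [pvCovF_cons, Finset.card_union_of_disjoint (pvDisjoint_covF p M hhd)]
    push_cast
    rw [pvRange_card, ih (fun q hq => h1 q (by simp [hq])) htl]
    have := h1 p (by simp)
    simp
    omega

theorem pvCard_inter_ranges (a b : Int × Int) :
    (((PySem.List.pyRange a.1 a.2 1).toFinset ∩ (PySem.List.pyRange b.1 b.2 1).toFinset).card : Int)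
      = max 0 (min a.2 b.2 - max a.1 b.1) := by
  have : (PySem.List.pyRange a.1 a.2 1).toFinset ∩ (PySem.List.pyRange b.1 b.2 1).toFinset
      = (PySem.List.pyRange (max a.1 b.1) (min a.2 b.2) 1).toFinset := by
    ext x
    simp [PySem.List.mem_pyRange_one]
    omega
  rw [this, pvRange_card]

theorem pvCard_S_covF (S : Finset Int) (M : List (Int × Int))
    (h2 : M.Pairwise (fun a b => a.2 < b.1)) :
    ((S ∩ pvCovF M).card : Int)
      = (M.map (fun b => ((S ∩ (PySem.List.pyRange b.1 b.2 1).toFinset).card : Int))).sum := by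
  induction M with
  | nil => simp [pvCovF]
  | cons p M ih =>
    obtain ⟨hhd, htl⟩ := List.pairwise_cons.mp h2
    rw [pvCovF_cons, Finset.inter_union_distrib_left,
      Finset.card_union_of_disjoint
        (Disjoint.mono Finset.inter_subset_right Finset.inter_subset_right (pvDisjoint_covF p M hhd))]
    push_cast
    rw [ih htl]
    simp

theorem pvCard_double (G P : List (Int × Int))
    (hG : G.Pairwise (fun a b => a.2 < b.1)) (hP : P.Pairwise (fun a b => a.2 < b.1)) :
    ((pvCovF G ∩ pvCovF P).card : Int)
      = (G.map (fun a => (P.map (fun b => max 0 (min a.2 b.2 - max a.1 b.1))).sum)).sum := by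
  induction G with
  | nil => simp [pvCovF]
  | cons a G ih =>
    obtain ⟨hhd, htl⟩ := List.pairwise_cons.mp hG
    rw [pvCovF_cons, Finset.union_inter_distrib_right,
      Finset.card_union_of_disjoint
        (Disjoint.mono Finset.inter_subset_left Finset.inter_subset_left (pvDisjoint_covF a G hhd))]
    push_cast
    rw [ih htl, pvCard_S_covF _ P hP]
    have hinner : ∀ b : Int × Int,
        (((PySem.List.pyRange a.1 a.2 1).toFinset ∩ (PySem.List.pyRange b.1 b.2 1).toFinset).card : Int)
          = max 0 (min a.2 b.2 - max a.1 b.1) := fun b => pvCard_inter_ranges a b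
    simp only [List.map_cons, List.sum_cons, hinner]

theorem pvTp_fold (G P : List (Int × Int)) (a0 : Int) :
    G.foldl (fun acc a => P.foldl (fun acc2 b => acc2 + max 0 (min a.2 b.2 - max a.1 b.1)) acc) a0
      = a0 + (G.map (fun a => (P.map (fun b => max 0 (min a.2 b.2 - max a.1 b.1))).sum)).sum := by
  induction G generalizing a0 with
  | nil => simp
  | cons a G ih =>
    rw [List.foldl_cons, ih, PySem.List.foldl_add]
    simp
    ring

theorem pvUnion_fold (l : List (PySem.Set Int)) (s : PySem.Set Int) (hs : s.Nodup) :
    (l.foldl PySem.Set.union s).Nodup ∧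
    (∀ x, x ∈ l.foldl PySem.Set.union s ↔ x ∈ s ∨ ∃ t ∈ l, x ∈ t) := by
  induction l generalizing s with
  | nil => exact ⟨hs, by simp⟩
  | cons t l ih =>
    obtain ⟨n1, n2⟩ := ih (PySem.Set.union s t) (PySem.Set.nodup_union s t hs)
    refine ⟨n1, fun x => ?_⟩
    rw [List.foldl_cons, n2 x, PySem.Set.mem_union]
    simp
    tauto

theorem pvSide (c : Int × Int) (ct : List (Int × Int)) :
    ((ct.map pvSpanSet).foldl PySem.Set.union (pvSpanSet c)).Nodup ∧
    (∀ x, x ∈ (ct.map pvSpanSet).foldl PySem.Set.union (pvSpanSet c) ↔ pvCov (c :: ct) x) := by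
  obtain ⟨n1, n2⟩ := pvUnion_fold (ct.map pvSpanSet) (pvSpanSet c) (PySem.List.nodup_pyRange_one c.1 c.2)
  refine ⟨n1, fun x => ?_⟩
  rw [n2 x]
  simp only [pvSpanSet, PySem.List.mem_pyRange_one, pvCov, List.mem_map]
  constructor
  · rintro (h | ⟨t, ⟨p, hp, rfl⟩, hx⟩)
    · exact ⟨c, by simp, h⟩
    · simp only [pvSpanSet, PySem.List.mem_pyRange_one] at hx
      exact ⟨p, by simp [hp], hx⟩
  · rintro ⟨p, hp, hx⟩
    rcases List.mem_cons.mp hp with rfl | hp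
    · exact Or.inl hx
    · exact Or.inr ⟨_, ⟨p, hp, rfl⟩, by simp [pvSpanSet, PySem.List.mem_pyRange_one]; exact hx⟩

theorem pvSideFinset (c : Int × Int) (ct : List (Int × Int)) :
    ((ct.map pvSpanSet).foldl PySem.Set.union (pvSpanSet c)).toFinset = pvCovF (pvMerged (c :: ct)) := by
  ext x
  rw [List.mem_toFinset, (pvSide c ct).2 x, mem_pvCovF, (pvMerged_props (c :: ct)).2.2 x]

theorem pvSideLen (c : Int × Int) (ct : List (Int × Int)) :
    PySem.Set.len ((ct.map pvSpanSet).foldl PySem.Set.union (pvSpanSet c))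
      = ((pvMerged (c :: ct)).map (fun q => q.2 - q.1)).sum := by
  have hn := (pvSide c ct).1
  have : PySem.Set.len ((ct.map pvSpanSet).foldl PySem.Set.union (pvSpanSet c))
      = ((((ct.map pvSpanSet).foldl PySem.Set.union (pvSpanSet c)).toFinset.card : Int)) := by
    rw [List.toFinset_card_of_nodup hn]
    simp [PySem.Set.len]
  rw [this, pvSideFinset c ct,
    pvCard_covF _ (pvMerged_props (c :: ct)).1 (pvMerged_props (c :: ct)).2.1]

theorem main_spec (gold pred : List (Int × Int)) (hg : gold ≠ []) (hp : pred ≠ []) :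
    compute_multi_spans gold pred = compute_multi_spans_alt gold pred := by
  obtain ⟨c, ct, rfl⟩ := List.exists_cons_of_ne_nil hg
  obtain ⟨d, dt, rfl⟩ := List.exists_cons_of_ne_nil hp
  have hGm := pvMerged_props (c :: ct)
  have hPm := pvMerged_props (d :: dt)
  have htp : PySem.Set.len (PySem.Set.inter ((ct.map pvSpanSet).foldl PySem.Set.union (pvSpanSet c))
      ((dt.map pvSpanSet).foldl PySem.Set.union (pvSpanSet d)))
      = (pvMerged (c :: ct)).foldl (fun acc a => (pvMerged (d :: dt)).foldl
          (fun acc2 b => acc2 + max 0 (min a.2 b.2 - max a.1 b.1)) acc) 0 := by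
    have hnod := PySem.Set.nodup_inter (s := (ct.map pvSpanSet).foldl PySem.Set.union (pvSpanSet c))
      (t := (dt.map pvSpanSet).foldl PySem.Set.union (pvSpanSet d)) (pvSide c ct).1
    have hfin : (PySem.Set.inter ((ct.map pvSpanSet).foldl PySem.Set.union (pvSpanSet c))
        ((dt.map pvSpanSet).foldl PySem.Set.union (pvSpanSet d))).toFinset
        = pvCovF (pvMerged (c :: ct)) ∩ pvCovF (pvMerged (d :: dt)) := by
      ext x
      rw [List.mem_toFinset, PySem.Set.mem_inter, Finset.mem_inter,
        ← pvSideFinset c ct, ← pvSideFinset d dt, List.mem_toFinset, List.mem_toFinset]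
    have : PySem.Set.len (PySem.Set.inter ((ct.map pvSpanSet).foldl PySem.Set.union (pvSpanSet c))
        ((dt.map pvSpanSet).foldl PySem.Set.union (pvSpanSet d)))
        = (((pvCovF (pvMerged (c :: ct)) ∩ pvCovF (pvMerged (d :: dt))).card : Int)) := by
      rw [← hfin, List.toFinset_card_of_nodup hnod]
      simp [PySem.Set.len]
    rw [this, pvCard_double _ _ hGm.2.1 hPm.2.1, pvTp_fold]
    ring
  show compute_multi_spans (c :: ct) (d :: dt) = compute_multi_spans_alt (c :: ct) (d :: dt)
  simp only [compute_multi_spans, compute_multi_spans_alt, List.map_cons,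
    pvHUnion_eq_union, pvHInter_eq]
  exact Prod.ext htp (Prod.ext (pvSideLen d dt) (pvSideLen c ct))

-- ===== VERDICT (by name: the statement is the Claim_ definition above) =====
theorem compute_multi_spans_spec : Claim_equal_compute_multi_spans := by
  intro gold_spans pred_spans _ hpre
  unfold Pre_compute_multi_spans at hpre
  unfold Spec_compute_multi_spans
  exact main_spec gold_spans pred_spans hpre.1 hpre.2
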